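-- pv_equiv track=rewrite | github.com/grigory-rechistov/cppsa | rolling.py | find_next_token
-- ===== SOURCE A (Python) =====
-- def find_next_token(line, tokens):
--     # Look for the earliest match of any of tokens
--     # Return tuple (token, position)
--     # Return (None, _) if nothing matched
--     min_pos = len(line) + 1
--     min_token = None
--     for token in tokens:
--         pos = line.find(token)
--         if pos == -1:
--             continue
--         if pos < min_pos:
--             min_pos = pos
--             min_token = token
--     return (min_token, min_pos)
-- ===== SOURCE B (Python) =====
-- def find_next_token(line, tokens):
--     # Scan positions left to right; at each position try tokens in order and
--     # return the first that starts there. Earliest position wins; ties go to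
--     # the earliest token in list order, matching per-token find-and-minimize.
--     for pos in range(len(line) + 1):
--         for token in tokens:
--             if line.startswith(token, pos):
--                 return (token, pos)
--     return (None, len(line) + 1)
-- ===== Notes on version B (the rewrite author's own statement) =====
-- stated objective: faster
-- what changed: Replaces A's per-token full-line line.find() minimization with a position-by-position scan (positions outer, tokens inner) that returns at the first position where some token starts; the early return skips the rest of the line, while A always runs a full find for every token.
import Mathlib
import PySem

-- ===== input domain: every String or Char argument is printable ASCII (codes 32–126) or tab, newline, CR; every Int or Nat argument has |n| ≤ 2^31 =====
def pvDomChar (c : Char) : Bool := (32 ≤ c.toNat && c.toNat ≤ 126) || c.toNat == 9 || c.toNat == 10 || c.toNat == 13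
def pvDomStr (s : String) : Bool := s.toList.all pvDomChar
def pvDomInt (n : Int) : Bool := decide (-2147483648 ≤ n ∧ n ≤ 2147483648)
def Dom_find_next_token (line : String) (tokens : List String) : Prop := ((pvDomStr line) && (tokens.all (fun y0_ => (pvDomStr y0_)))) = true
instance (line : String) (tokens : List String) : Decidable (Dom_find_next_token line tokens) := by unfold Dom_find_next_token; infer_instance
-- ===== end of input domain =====

-- B replaces A's per-token find-and-minimize by a position-by-position scan with early
-- return (positions outer, tokens inner); the early return stops at the earliest match,
-- measured faster than A's always-full per-token finds (objective: faster).


-- ===== PORT A =====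
-- min_pos/min_token loop over tokens, minimizing line.find(token); state is the pair
-- (min_token, min_pos), branches in A's order.
def find_next_token (line : String) (tokens : List String) : Option String × Int :=
  tokens.foldl
    (fun acc token =>
      let pos := PySem.Str.find line token
      if pos = -1 then acc
      else if pos < acc.2 then (some token, pos)
      else acc)
    ((none : Option String), PySem.Str.len line + 1)

-- ===== PORT B =====
-- for pos in range(len(line)+1): for token in tokens: if line.startswith(token, pos): return (token, pos)
-- line.startswith(token, pos) with 0 ≤ pos is exactly: token.toList is a prefix of line.toList.drop pos.
def find_next_token_alt (line : String) (tokens : List String) : Option String × Int :=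
  match (List.range (line.toList.length + 1)).findSome?
      (fun pos =>
        (tokens.find? (fun token => PySem.Chars.startswith (line.toList.drop pos) token.toList)).map
          (fun token => (token, (pos : Int)))) with
  | some (token, pos) => (some token, pos)
  | none => (none, (line.toList.length : Int) + 1)

-- ===== PRECONDITION & SPEC =====
def Spec_find_next_token (line : String) (tokens : List String) (out : Option String × Int) : Prop := out = find_next_token_alt line tokens
instance (line : String) (tokens : List String) (out : Option String × Int) : Decidable (Spec_find_next_token line tokens out) := by unfold Spec_find_next_token; infer_instance

-- ===== CLAIM (what is proved, stated in full; the proofs are below) =====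
def Claim_equal_find_next_token : Prop := ∀ (line : String) (tokens : List String), Dom_find_next_token line tokens → Spec_find_next_token line tokens (find_next_token line tokens)

-- ===== LEMMAS AND PROOFS =====

-- A's fold, re-expressed as a recursion that forgets the carried token when it is not
-- the final answer: fmt ts bound = (final token, its find-position) of A's minimization
-- over ts starting from bound, or none if no token improves bound.
def fmt (cs : List Char) : List String → Int → Option (String × Int)
  | [], _ => none
  | t :: ts, bound =>
    let pos := PySem.Chars.find cs t.toList
    if pos = -1 then fmt cs ts bound
    else if pos < bound then some ((fmt cs ts pos).getD (t, pos))
    else fmt cs ts bound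

theorem foldA_eq (line : String) (ts : List String) : ∀ (mt : Option String) (bound : Int),
    ts.foldl
      (fun acc token =>
        if PySem.Chars.find line.toList token.toList = -1 then acc
        else if PySem.Chars.find line.toList token.toList < acc.2 then
          (some token, PySem.Chars.find line.toList token.toList)
        else acc)
      (mt, bound)
    = match fmt line.toList ts bound with
      | none => (mt, bound)
      | some (t, p) => (some t, p) := by
  induction ts with
  | nil => intro mt bound; simp [fmt]
  | cons t ts ih =>
    intro mt bound
    simp only [List.foldl_cons, fmt]
    split_ifs with h1 h2
    · exact ih mt bound
    · rw [ih (some t) (PySem.Chars.find line.toList t.toList)]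
      cases hf : fmt line.toList ts (PySem.Chars.find line.toList t.toList) with
      | none => simp
      | some r => cases r; simp
    · exact ih mt bound

theorem fmt_none (cs : List Char) : ∀ (ts : List String) (bound : Int), fmt cs ts bound = none →
    ∀ t ∈ ts, PySem.Chars.find cs t.toList = -1 ∨ bound ≤ PySem.Chars.find cs t.toList := by
  intro ts
  induction ts with
  | nil => simp
  | cons t ts ih =>
    intro bound h u hu
    simp only [fmt] at h
    split_ifs at h with h1 h2
    · rcases List.mem_cons.mp hu with rfl | hu'
      · exact Or.inl h1
      · exact ih bound h u hu'
    · rcases List.mem_cons.mp hu with rfl | hu'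
      · exact Or.inr (by omega)
      · exact ih bound h u hu'

theorem fmt_spec (cs : List Char) : ∀ (ts : List String) (bound : Int) (t0 : String) (p0 : Int),
    fmt cs ts bound = some (t0, p0) →
    p0 = PySem.Chars.find cs t0.toList ∧ 0 ≤ p0 ∧ p0 < bound ∧
    (∀ t ∈ ts, 0 ≤ PySem.Chars.find cs t.toList → PySem.Chars.find cs t.toList < bound →
      p0 ≤ PySem.Chars.find cs t.toList) ∧
    ∃ l r, ts = l ++ t0 :: r ∧
      ∀ t ∈ l, 0 ≤ PySem.Chars.find cs t.toList → p0 < PySem.Chars.find cs t.toList := by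
  intro ts
  induction ts with
  | nil => simp [fmt]
  | cons t ts ih =>
    intro bound t0 p0 h
    simp only [fmt] at h
    split_ifs at h with h1 h2
    · -- t's find is -1: t is skipped
      obtain ⟨hp, hnn, hlt, hmin, l, r, hsplit, hearly⟩ := ih bound t0 p0 h
      refine ⟨hp, hnn, hlt, ?_, t :: l, r, by simp [hsplit], ?_⟩
      · intro u hu hnn' hlt'
        rcases List.mem_cons.mp hu with rfl | hu'
        · omega
        · exact hmin u hu' hnn' hlt'
      · intro u hu hnn'
        rcases List.mem_cons.mp hu with rfl | hu'
        · omega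
        · exact hearly u hu' hnn'
    · -- t improves the bound
      have hnn_t : (0:Int) ≤ PySem.Chars.find cs t.toList := by
        have := PySem.Chars.neg_one_le_find cs t.toList; omega
      cases hf : fmt cs ts (PySem.Chars.find cs t.toList) with
      | none =>
        simp only [hf, Option.getD_none] at h
        obtain ⟨rfl, rfl⟩ : t0 = t ∧ p0 = PySem.Chars.find cs t.toList := by
          have := Option.some.inj h; exact ⟨congrArg Prod.fst this.symm, congrArg Prod.snd this.symm⟩
        refine ⟨rfl, hnn_t, h2, ?_, [], ts, rfl, by simp⟩
        intro u hu hnn' hlt'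
        rcases List.mem_cons.mp hu with rfl | hu'
        · omega
        · rcases fmt_none cs ts _ hf u hu' with h' | h' <;> omega
      | some r0 =>
        simp only [hf, Option.getD_some] at h
        obtain rfl : r0 = (t0, p0) := Option.some.inj h
        obtain ⟨hp, hnn, hlt, hmin, l, r, hsplit, hearly⟩ :=
          ih (PySem.Chars.find cs t.toList) t0 p0 hf
        refine ⟨hp, hnn, by omega, ?_, t :: l, r, by simp [hsplit], ?_⟩
        · intro u hu hnn' hlt'
          rcases List.mem_cons.mp hu with rfl | hu'
          · omega
          · by_cases hc : PySem.Chars.find cs u.toList < PySem.Chars.find cs t.toList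
            · exact hmin u hu' hnn' hc
            · omega
        · intro u hu hnn'
          rcases List.mem_cons.mp hu with rfl | hu'
          · omega
          · exact hearly u hu' hnn'
    · -- t's find does not beat the bound
      obtain ⟨hp, hnn, hlt, hmin, l, r, hsplit, hearly⟩ := ih bound t0 p0 h
      refine ⟨hp, hnn, hlt, ?_, t :: l, r, by simp [hsplit], ?_⟩
      · intro u hu hnn' hlt'
        rcases List.mem_cons.mp hu with rfl | hu'
        · omega
        · exact hmin u hu' hnn' hlt'
      · intro u hu hnn'
        rcases List.mem_cons.mp hu with rfl | hu'
        · omega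
        · exact hearly u hu' hnn'

-- findSome? over range N returns the value at the least position with a hit.
theorem findSome?_range_min {α : Type} (F : Nat → Option α) :
    ∀ (N : Nat) (r : α), (List.range N).findSome? F = some r →
    ∃ p < N, F p = some r ∧ ∀ q < p, F q = none := by
  intro N
  induction N with
  | zero => simp
  | succ N ih =>
    intro r h
    rw [List.range_succ, List.findSome?_append] at h
    cases hN : (List.range N).findSome? F with
    | some r' =>
      rw [hN] at h
      obtain ⟨p, hp, hFp, hq⟩ := ih r' hN
      simp only [Option.some_or] at h
      exact ⟨p, by omega, h ▸ hFp, hq⟩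
    | none =>
      rw [hN, Option.none_or] at h
      simp only [List.findSome?_cons] at h
      have hall := List.findSome?_eq_none_iff.mp hN
      refine ⟨N, by omega, ?_, fun q hq => hall q (List.mem_range.mpr hq)⟩
      cases hFN : F N with
      | none => rw [hFN] at h; simp at h
      | some v => rw [hFN] at h; simpa [hFN] using h

-- a token matching at position p has a nonnegative find ≤ p
theorem find_le_of_match (cs : List Char) (t : String) (p : Nat)
    (h : t.toList <+: cs.drop p) :
    0 ≤ PySem.Chars.find cs t.toList ∧ PySem.Chars.find cs t.toList ≤ (p : Int) := by
  have hnn : 0 ≤ PySem.Chars.find cs t.toList := by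
    rw [PySem.Chars.find_nonneg_iff]
    rw [← PySem.Chars.isIn_iff_infix, ← PySem.Chars.exists_prefix_drop_iff_isIn]
    exact ⟨p, h⟩
  refine ⟨hnn, ?_⟩
  by_contra hlt
  exact (PySem.Chars.find_spec hnn).2 p (by omega) h

theorem find_next_token_eq (line : String) (tokens : List String) :
    find_next_token line tokens = find_next_token_alt line tokens := by
  unfold find_next_token find_next_token_alt
  simp only [PySem.Str.find_eq, PySem.Str.len_eq]
  rw [foldA_eq]
  set cs := line.toList with hcs
  set N := cs.length with hN
  cases hB : (List.range (N + 1)).findSome?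
      (fun pos =>
        (tokens.find? (fun token => PySem.Chars.startswith (cs.drop pos) token.toList)).map
          (fun token => (token, (pos : Int)))) with
  | none =>
    -- no token matches anywhere ⇒ A's fmt is none too
    have hall := List.findSome?_eq_none_iff.mp hB
    cases hf : fmt cs tokens ((N : Int) + 1) with
    | none => simp
    | some r =>
      obtain ⟨t0, p0⟩ := r
      obtain ⟨hp, hnn, _, _, l, rr, hsplit, _⟩ := fmt_spec cs tokens _ t0 p0 hf
      have ht0mem : t0 ∈ tokens := hsplit ▸ List.mem_append_right l (List.mem_cons_self ..)
      have hle : PySem.Chars.find cs t0.toList ≤ (N : Int) := PySem.Chars.find_le_length cs t0.toList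
      have hmatch : t0.toList <+: cs.drop p0.toNat := by
        rw [hp] at hnn ⊢; exact (PySem.Chars.find_spec hnn).1
      have := hall p0.toNat (List.mem_range.mpr (by omega))
      simp only [Option.map_eq_none_iff, List.find?_eq_none] at this
      exact absurd ((PySem.Chars.startswith_iff _ _).mpr hmatch) (by simpa using this t0 ht0mem)
  | some r =>
    obtain ⟨p, hpN, hFp, hprev⟩ := findSome?_range_min _ (N + 1) r hB
    obtain ⟨t1, hfind1, rfl⟩ : ∃ t1,
        tokens.find? (fun token => PySem.Chars.startswith (cs.drop p) token.toList) = some t1 ∧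
        r = (t1, (p : Int)) := by
      cases hq : tokens.find? (fun token => PySem.Chars.startswith (cs.drop p) token.toList) with
      | none => rw [hq] at hFp; simp at hFp
      | some t1 => rw [hq] at hFp; exact ⟨t1, rfl, by simpa using hFp.symm⟩
    have hmatch1 : t1.toList <+: cs.drop p := by
      have := (List.find?_eq_some_iff_append.mp hfind1).1
      exact (PySem.Chars.startswith_iff _ _).mp this
    have ht1 := find_le_of_match cs t1 p hmatch1
    -- A's fmt cannot be none
    cases hf : fmt cs tokens ((N : Int) + 1) with
    | none =>
      rcases fmt_none cs tokens _ hf t1 (List.mem_of_find?_eq_some hfind1) with h' | h'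
      · omega
      · have := PySem.Chars.find_le_length cs t1.toList; omega
    | some r0 =>
      obtain ⟨t0, p0⟩ := r0
      obtain ⟨hp0, hnn0, _, hmin, l, rr, hsplit, hearly⟩ := fmt_spec cs tokens _ t0 p0 hf
      have ht0mem : t0 ∈ tokens := hsplit ▸ List.mem_append_right l (List.mem_cons_self ..)
      have hle0 : PySem.Chars.find cs t0.toList ≤ (N : Int) := PySem.Chars.find_le_length cs t0.toList
      -- p0 ≤ p via minimality over tokens (t1 qualifies)
      have hmin1 : p0 ≤ PySem.Chars.find cs t1.toList := by
        refine hmin t1 (List.mem_of_find?_eq_some hfind1) ht1.1 ?_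
        have := PySem.Chars.find_le_length cs t1.toList; omega
      -- p ≤ p0: t0 matches at p0.toNat, and positions before p have no match
      have hmatch0 : t0.toList <+: cs.drop p0.toNat := by
        rw [hp0] at hnn0 ⊢; exact (PySem.Chars.find_spec hnn0).1
      have hple : p ≤ p0.toNat := by
        by_contra hlt
        have := hprev p0.toNat (by omega)
        simp only [Option.map_eq_none_iff, List.find?_eq_none] at this
        exact absurd ((PySem.Chars.startswith_iff _ _).mpr hmatch0) (by simpa using this t0 ht0mem)
      have hpp0 : p0 = (p : Int) := by omega
      -- t0 is also the first token matching at p, hence t0 = t1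
      have hfind0 : tokens.find? (fun token => PySem.Chars.startswith (cs.drop p) token.toList)
          = some t0 := by
        rw [List.find?_eq_some_iff_append]
        refine ⟨(PySem.Chars.startswith_iff _ _).mpr (by rwa [hpp0, Int.toNat_natCast] at hmatch0),
          l, rr, hsplit, ?_⟩
        intro u hu
        simp only [Bool.not_eq_eq_eq_not, Bool.not_true]
        by_contra hcon
        have hmatchu : u.toList <+: cs.drop p := by
          have : PySem.Chars.startswith (cs.drop p) u.toList = true := by
            cases hx : PySem.Chars.startswith (cs.drop p) u.toList
            · exact absurd hx hcon
            · rfl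
          exact (PySem.Chars.startswith_iff _ _).mp this
        have := find_le_of_match cs u p hmatchu
        have := hearly u hu this.1
        omega
      have : t0 = t1 := by rw [hfind0] at hfind1; exact Option.some.inj hfind1
      simp [this, hpp0]

-- ===== VERDICT (by name: the statement is the Claim_ definition above) =====
theorem find_next_token_spec : Claim_equal_find_next_token := by
  intro line tokens _
  unfold Spec_find_next_token
  exact find_next_token_eq line tokens
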